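-- pv_equiv track=rewrite | github.com/Royal00Blood/Python-Geek | HW_Семинар_3/task_5.py | complit_list_fib
-- ===== SOURCE A (Python) =====
-- def fibonachi_solve(n):
--     fib1 = 1
--     fib2 = 1
--     if n>2:
--         i = 0
--         while i < n - 2:
--             fib_sum = fib1 + fib2
--             fib1 = fib2
--             fib2 = fib_sum
--             i = i + 1
--     return fib2
--
-- def complit_list_fib(n):
--     list_fib = []
--     for i in range(n):
--         list_fib.append(fibonachi_solve(n-i)*(-1)**(i+1))
--     list_fib.append(0)
--     for i in range(1,n+1):
--         list_fib.append(fibonachi_solve(i))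
--     return list_fib
-- ===== SOURCE B (Python) =====
-- def complit_list_fib(n):
--     fibs = []
--     a, b = 1, 1
--     for _ in range(n):
--         fibs.append(a)
--         a, b = b, a + b
--     neg = [-f if k % 2 == 0 else f for k, f in enumerate(reversed(fibs))]
--     return neg + [0] + fibs
-- ===== Notes on version B (the rewrite author's own statement) =====
-- stated objective: faster
-- what changed: B computes fib(1..n) once in a single linear pass and builds the signed half by enumerating the reversed list, instead of A's recomputing each Fibonacci number from scratch inside both loops.
import Mathlib
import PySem

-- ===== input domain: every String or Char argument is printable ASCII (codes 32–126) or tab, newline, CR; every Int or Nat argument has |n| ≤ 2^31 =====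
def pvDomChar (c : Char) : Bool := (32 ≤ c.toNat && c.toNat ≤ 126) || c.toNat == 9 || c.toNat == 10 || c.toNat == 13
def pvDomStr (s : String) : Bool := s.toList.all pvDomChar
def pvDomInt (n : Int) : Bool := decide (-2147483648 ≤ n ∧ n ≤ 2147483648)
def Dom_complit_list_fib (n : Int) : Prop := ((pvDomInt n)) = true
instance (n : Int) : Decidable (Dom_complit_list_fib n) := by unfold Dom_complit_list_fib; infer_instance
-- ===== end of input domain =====

-- B recomputes fib(1..n) once in a single linear pass instead of A's per-element
-- recomputation from scratch (objective: faster, O(n) vs O(n^2); same return value).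

-- ===== PORT A =====
-- while loop of fibonachi_solve: runs (n-2) iterations when n > 2
def fibHelper : Nat → Int → Int → Int
  | 0, _, fib2 => fib2
  | m+1, fib1, fib2 => fibHelper m fib2 (fib1 + fib2)

def fibonachi_solve (n : Int) : Int :=
  if n > 2 then fibHelper (n - 2).toNat 1 1 else 1

def complit_list_fib (n : Int) : List Int :=
  let l1 := (PySem.List.pyRange 0 n 1).foldl
    (fun acc i => acc ++ [fibonachi_solve (n - i) * (-1 : Int) ^ (i + 1).toNat]) []
  let l2 := l1 ++ [0]
  (PySem.List.pyRange 1 (n + 1) 1).foldl (fun acc i => acc ++ [fibonachi_solve i]) l2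

-- ===== PORT B =====
-- the linear pass: a, b = 1, 1; append a; a, b = b, a + b
def fibList : Nat → Int → Int → List Int
  | 0, _, _ => []
  | m+1, a, b => a :: fibList m b (a + b)

def complit_list_fib_alt (n : Int) : List Int :=
  let fibs := fibList n.toNat 1 1
  let neg := (PySem.List.enumerate fibs.reverse).map
    (fun kf => if PySem.Int.mod kf.1 2 = 0 then -kf.2 else kf.2)
  neg ++ [0] ++ fibs

-- ===== PRECONDITION & SPEC =====
def Spec_complit_list_fib (n : Int) (out : List Int) : Prop := out = complit_list_fib_alt n
instance (n : Int) (out : List Int) : Decidable (Spec_complit_list_fib n out) := by unfold Spec_complit_list_fib; infer_instance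

-- ===== CLAIM (what is proved, stated in full; the proofs are below) =====
def Claim_equal_complit_list_fib : Prop := ∀ (n : Int), Dom_complit_list_fib n → Spec_complit_list_fib n (complit_list_fib n)

-- ===== LEMMAS AND PROOFS =====

/-- Mathematical Fibonacci, shifted: pvF k = fib(k+1). -/
def pvF : Nat → Int
  | 0 => 1
  | 1 => 1
  | m+2 => pvF m + pvF (m+1)

theorem pvF_add2 (k : Nat) : pvF k + pvF (k+1) = pvF (k+2) := rfl

theorem fibHelper_F (m k : Nat) : fibHelper m (pvF k) (pvF (k+1)) = pvF (k+m+1) := by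
  induction m generalizing k with
  | zero => simp [fibHelper]
  | succ m ih =>
      rw [fibHelper, pvF_add2, ih (k+1)]
      congr 1; omega

theorem solve_F (j : Int) (h : 1 ≤ j) : fibonachi_solve j = pvF (j.toNat - 1) := by
  unfold fibonachi_solve
  split_ifs with hj
  · have h1 : fibHelper (j-2).toNat (pvF 0) (pvF 1) = pvF (0 + (j-2).toNat + 1) :=
      fibHelper_F (j-2).toNat 0
    simp only [pvF] at h1
    rw [h1]; congr 1; omega
  · have : j = 1 ∨ j = 2 := by omega
    rcases this with h' | h' <;> subst h' <;> rfl

theorem fibList_F (m k : Nat) :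
    fibList m (pvF k) (pvF (k+1)) = (List.range m).map (fun j => pvF (k+j)) := by
  induction m generalizing k with
  | zero => simp [fibList]
  | succ m ih =>
      rw [fibList, pvF_add2, ih (k+1), List.range_succ_eq_map, List.map_cons, List.map_map]
      have h : ∀ j : Nat, k + 1 + j = k + (j + 1) := fun j => by omega
      simp [Function.comp, h]

theorem fibList_eq (m : Nat) : fibList m 1 1 = (List.range m).map pvF := by
  have := fibList_F m 0
  simpa [pvF] using this

theorem neg_one_pow_succ (k : Nat) :
    ((-1 : Int) ^ (k + 1)) = if k % 2 = 0 then -1 else 1 := by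
  rcases Nat.even_or_odd k with he | ho
  · have : Odd (k + 1) := Even.add_one he
    rw [this.neg_one_pow, if_pos (Nat.even_iff.mp he)]
  · have : Even (k + 1) := Odd.add_one ho
    have h1 : k % 2 = 1 := Nat.odd_iff.mp ho
    rw [this.neg_one_pow, if_neg (by omega)]

theorem seg1 (n : Int) :
    (PySem.List.pyRange 0 n 1).map
      (fun i => fibonachi_solve (n - i) * (-1 : Int) ^ (i + 1).toNat)
  = (PySem.List.enumerate ((fibList n.toNat 1 1).reverse)).map
      (fun kf => if PySem.Int.mod kf.1 2 = 0 then -kf.2 else kf.2) := by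
  rw [fibList_eq, PySem.List.pyRange_one]
  apply List.ext_getElem
  · simp [PySem.List.length_enumerate]
  · intro k h1 h2
    simp only [List.getElem_map, List.getElem_range, PySem.List.getElem_enumerate]
    have hk : k < n.toNat := by simpa using h1
    have hrev : (((List.range n.toNat).map pvF).reverse)[k]'(by simpa using h2) =
        pvF (n.toNat - 1 - k) := by
      rw [List.getElem_reverse]
      simp only [List.getElem_map, List.getElem_range]
      congr 1
      simp only [List.length_map, List.length_range]
    rw [hrev]
    have hval : fibonachi_solve (n - (0 + (k : Int))) = pvF (n.toNat - 1 - k) := by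
      rw [solve_F _ (by omega)]
      congr 1; omega
    rw [hval]
    have hexp : ((0 : Int) + (k : Int) + 1).toNat = k + 1 := by omega
    have hmod : PySem.Int.mod ((0 : Int) + (k : Int)) 2 = ((k % 2 : Nat) : Int) := by
      rw [Int.zero_add]
      exact PySem.Int.mod_natCast k 2
    rw [hexp, neg_one_pow_succ, hmod]
    by_cases hp : k % 2 = 0
    · rw [if_pos hp, if_pos (by exact_mod_cast congrArg (Nat.cast : Nat → Int) hp)]
      ring
    · have hp1 : k % 2 = 1 := by omega
      rw [if_neg hp, if_neg (by rw [hp1]; norm_num)]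
      ring

theorem seg2 (n : Int) :
    (PySem.List.pyRange 1 (n + 1) 1).map fibonachi_solve = fibList n.toNat 1 1 := by
  rw [fibList_eq, PySem.List.pyRange_one]
  have h : (n + 1 - 1).toNat = n.toNat := by omega
  rw [h, List.map_map]
  apply List.map_congr_left
  intro j hj
  have hj' : j < n.toNat := List.mem_range.mp hj
  simp only [Function.comp]
  rw [solve_F _ (by omega)]
  congr 1; omega

-- ===== VERDICT (by name: the statement is the Claim_ definition above) =====
theorem complit_list_fib_spec : Claim_equal_complit_list_fib := by
  intro n _
  unfold Spec_complit_list_fib complit_list_fib complit_list_fib_alt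
  simp only [PySem.List.foldl_append_singleton_eq_map, List.nil_append]
  rw [seg1, seg2]
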